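-- pv_equiv track=rewrite | github.com/ibitec7/migration | scripts/sync_github_wiki.py | strip_obsidian_tip_and_optional
-- ===== SOURCE A (Python) =====
-- def strip_obsidian_tip_and_optional(text: str) -> str:
--     """Remove Obsidian-only tip blockquote and Optional Enhancements section from index copy."""
--     lines = text.splitlines(keepends=True)
--     out: list[str] = []
--     skipping_optional = False
--     for line in lines:
--         if line.startswith("## Optional Enhancements"):
--             skipping_optional = True
--             continue
--         if skipping_optional:
--             continue
--         if line.startswith("> **Tip**:") or (out and out[-1].startswith("> ") and line.startswith("> ")):
--             # Drop blockquote: skip consecutive > lines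
--             continue
--         if line.startswith("> "):
--             continue
--         out.append(line)
--     return "".join(out)
-- ===== SOURCE B (Python) =====
-- def strip_obsidian_tip_and_optional(text: str) -> str:
--     """Remove Obsidian-only tip blockquote and Optional Enhancements section from index copy."""
--     lines = text.splitlines(keepends=True)
--     cutoff = len(lines)
--     for i, line in enumerate(lines):
--         if line.startswith("## Optional Enhancements"):
--             cutoff = i
--             break
--     return "".join(line for line in lines[:cutoff] if not line.startswith("> "))
-- ===== Notes on version B (the rewrite author's own statement) =====
-- stated objective: simpler
-- what changed: Replaces the stateful single pass (skipping flag plus a dead last-output blockquote-continuation check) by a locate-cutoff pass followed by a truncate-and-filter comprehension.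
import Mathlib
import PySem

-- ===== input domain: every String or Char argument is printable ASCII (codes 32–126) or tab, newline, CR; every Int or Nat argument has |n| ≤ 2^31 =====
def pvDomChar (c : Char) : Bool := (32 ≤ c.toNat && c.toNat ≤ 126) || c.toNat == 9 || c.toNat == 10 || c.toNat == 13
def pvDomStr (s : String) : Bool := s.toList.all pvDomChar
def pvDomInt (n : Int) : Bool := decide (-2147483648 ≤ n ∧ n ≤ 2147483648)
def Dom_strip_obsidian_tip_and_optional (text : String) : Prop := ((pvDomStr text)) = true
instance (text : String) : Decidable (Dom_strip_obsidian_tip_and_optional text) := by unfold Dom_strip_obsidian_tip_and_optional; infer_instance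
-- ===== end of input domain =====

-- B replaces A's stateful single pass (skipping flag + dead blockquote-continuation check)
-- by a locate-cutoff pass followed by truncate-and-filter; equivalence proved (objective: simpler).

-- ===== PORT A =====
-- hand port of str.splitlines(keepends=True): exact on inputs whose characters are
-- printable ASCII / tab / '\n' / '\r' (Dom), where the only line breaks are '\n', '\r', '\r\n'
def pvSplitKeep (acc : List Char) : List Char → List (List Char)
  | [] => if acc = [] then [] else [acc.reverse]
  | '\n' :: cs => (acc.reverse ++ ['\n']) :: pvSplitKeep [] cs
  | '\r' :: '\n' :: cs => (acc.reverse ++ ['\r', '\n']) :: pvSplitKeep [] cs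
  | '\r' :: cs => (acc.reverse ++ ['\r']) :: pvSplitKeep [] cs
  | c :: cs => pvSplitKeep (c :: acc) cs
  termination_by cs => cs.length
  decreasing_by all_goals (simp only [List.length_cons]; omega)

-- A's loop: out accumulator plus a skipping_optional flag, branches in source order
def pvLoopA : List (List Char) → List (List Char) → Bool → List (List Char)
  | [], out, _ => out
  | l :: ls, out, skip =>
    if PySem.Chars.startswith l "## Optional Enhancements".toList then
      pvLoopA ls out true
    else if skip then
      pvLoopA ls out skip
    else if PySem.Chars.startswith l "> **Tip**:".toList ||
        (!out.isEmpty && PySem.Chars.startswith (out.getLastD []) "> ".toList &&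
          PySem.Chars.startswith l "> ".toList) then
      pvLoopA ls out skip
    else if PySem.Chars.startswith l "> ".toList then
      pvLoopA ls out skip
    else
      pvLoopA ls (out ++ [l]) skip

def strip_obsidian_tip_and_optional (text : String) : String :=
  String.ofList (PySem.Chars.join [] (pvLoopA (pvSplitKeep [] text.toList) [] false))

-- ===== PORT B =====
-- B's first pass: index of the first '## Optional Enhancements' line (len if absent)
def pvCutoff : List (List Char) → Nat
  | [] => 0
  | l :: ls =>
    if PySem.Chars.startswith l "## Optional Enhancements".toList then 0
    else 1 + pvCutoff ls

def strip_obsidian_tip_and_optional_alt (text : String) : String :=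
  let lines := pvSplitKeep [] text.toList
  String.ofList (PySem.Chars.join []
    ((lines.take (pvCutoff lines)).filter
      (fun l => !PySem.Chars.startswith l "> ".toList)))

-- ===== PRECONDITION & SPEC =====
def Spec_strip_obsidian_tip_and_optional (text : String) (out : String) : Prop := out = strip_obsidian_tip_and_optional_alt text
instance (text : String) (out : String) : Decidable (Spec_strip_obsidian_tip_and_optional text out) := by unfold Spec_strip_obsidian_tip_and_optional; infer_instance

-- ===== CLAIM (what is proved, stated in full; the proofs are below) =====
def Claim_equal_strip_obsidian_tip_and_optional : Prop := ∀ (text : String), Dom_strip_obsidian_tip_and_optional text → Spec_strip_obsidian_tip_and_optional text (strip_obsidian_tip_and_optional text)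

-- ===== LEMMAS AND PROOFS =====

-- once the skipping flag is set, A's loop never changes out again
lemma pvLoopA_skip (ls : List (List Char)) (out : List (List Char)) :
    pvLoopA ls out true = out := by
  induction ls with
  | nil => rfl
  | cons l ls ih => simp [pvLoopA, ih]

lemma pvStartswith_tip_gt (l : List Char) :
    PySem.Chars.startswith l "> **Tip**:".toList = true →
    PySem.Chars.startswith l "> ".toList = true := by
  intro h
  simp [PySem.Chars.startswith, List.isPrefixOf_iff_prefix] at h ⊢
  exact List.IsPrefix.trans (by decide) h

-- main invariant: A's loop with the flag off appends exactly B's truncate-and-filter,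
-- provided out's last element does not start with "> " (it never does)
lemma pvLoopA_eq (ls : List (List Char)) :
    ∀ out : List (List Char),
      PySem.Chars.startswith (out.getLastD []) "> ".toList = false →
      pvLoopA ls out false =
        out ++ (ls.take (pvCutoff ls)).filter
          (fun l => !PySem.Chars.startswith l "> ".toList) := by
  induction ls with
  | nil => intro out _; simp [pvLoopA, pvCutoff]
  | cons l ls ih =>
    intro out hout
    rw [pvLoopA, pvCutoff]
    by_cases hm : PySem.Chars.startswith l "## Optional Enhancements".toList = true
    · rw [if_pos hm, if_pos hm, pvLoopA_skip]
      simp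
    · rw [if_neg hm, if_neg hm]
      rw [show (1 + pvCutoff ls) = pvCutoff ls + 1 from Nat.add_comm 1 _,
          List.take_succ_cons]
      simp only [Bool.false_eq_true, if_false, hout, Bool.and_false,
        List.filter_cons]
      by_cases htip : PySem.Chars.startswith l "> **Tip**:".toList = true
      · have hgt := pvStartswith_tip_gt l htip
        simp only [htip, hgt, Bool.true_or, Bool.not_true, Bool.false_eq_true, reduceIte]
        exact ih out hout
      · have htip' := (Bool.not_eq_true _).mp htip
        by_cases hgt : PySem.Chars.startswith l "> ".toList = true
        · simp only [htip', hgt, Bool.false_or, Bool.false_and, Bool.not_true,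
            Bool.false_eq_true, reduceIte]
          exact ih out hout
        · have hgt' := (Bool.not_eq_true _).mp hgt
          simp only [htip', hgt', Bool.false_or, Bool.false_and, Bool.not_false,
            Bool.false_eq_true, reduceIte]
          rw [ih (out ++ [l]) (by simpa using hgt')]
          simp
-- ===== VERDICT (by name: the statement is the Claim_ definition above) =====
theorem strip_obsidian_tip_and_optional_spec : Claim_equal_strip_obsidian_tip_and_optional := by
  intro text _
  show _ = _
  unfold strip_obsidian_tip_and_optional strip_obsidian_tip_and_optional_alt
  rw [pvLoopA_eq _ [] rfl]
  rfl
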